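-- pv_equiv track=rewrite | github.com/MBudzyn/University | MIA/lista6/zad1.py | divisible_by_20
-- ===== SOURCE A (Python) =====
-- def divisible_by_20(string):
--     is_0 = False
--     is_2_4_6_8_0 = False
--     for i in string:
--         if i == "0" and not is_0:
--             is_0 = True
--         elif i == "0" or i == "2" or i == "4" or i == "6" or i == "8":
--             is_2_4_6_8_0 = True
--     return is_0 and is_2_4_6_8_0
-- ===== SOURCE B (Python) =====
-- def divisible_by_20(string):
--     zeros = sum(1 for c in string if c == "0")
--     has_even = any(c in "2468" for c in string)
--     return zeros >= 1 and (has_even or zeros >= 2)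
-- ===== Notes on version B (the rewrite author's own statement) =====
-- stated objective: simpler
-- what changed: A's interdependent stateful flags (where the elif only catches the second-or-later zero) are replaced by two independent aggregates - a zero count and an even-digit-2468 test - combined by the closed formula zeros >= 1 and (has_even or zeros >= 2).
import Mathlib
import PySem

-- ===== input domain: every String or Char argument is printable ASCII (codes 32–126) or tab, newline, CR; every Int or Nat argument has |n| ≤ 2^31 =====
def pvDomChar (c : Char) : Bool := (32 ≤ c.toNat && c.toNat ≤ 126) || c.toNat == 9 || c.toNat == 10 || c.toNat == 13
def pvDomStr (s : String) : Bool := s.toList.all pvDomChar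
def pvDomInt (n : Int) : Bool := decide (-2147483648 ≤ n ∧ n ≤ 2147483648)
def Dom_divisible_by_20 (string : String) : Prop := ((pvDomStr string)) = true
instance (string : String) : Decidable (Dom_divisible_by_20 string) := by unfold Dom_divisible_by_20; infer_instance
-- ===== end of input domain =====

-- B replaces A's two interdependent stateful flags with independent aggregates
-- (a zero count and an even-digit test) combined by one closed boolean formula; objective: simpler.


-- ===== PORT A =====
-- the for-loop over the string's characters carrying the two flags (is_0, is_2_4_6_8_0)
def divisible_by_20 (string : String) : Bool :=
  let st := string.toList.foldl (fun (st : Bool × Bool) i =>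
    if i == '0' && !st.1 then (true, st.2)
    else if i == '0' || i == '2' || i == '4' || i == '6' || i == '8' then (st.1, true)
    else st) (false, false)
  st.1 && st.2

-- ===== PORT B =====
-- zeros = sum(1 for c in string if c == "0"); has_even = any(c in "2468" for c in string)
def divisible_by_20_alt (string : String) : Bool :=
  let zeros : Int := string.toList.foldl (fun acc c => if c == '0' then acc + 1 else acc) 0
  let has_even : Bool := string.toList.any (fun c => "2468".toList.contains c)
  decide (zeros ≥ 1) && (has_even || decide (zeros ≥ 2))

-- ===== PRECONDITION & SPEC =====
def Spec_divisible_by_20 (string : String) (out : Bool) : Prop := out = divisible_by_20_alt string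
instance (string : String) (out : Bool) : Decidable (Spec_divisible_by_20 string out) := by unfold Spec_divisible_by_20; infer_instance

-- ===== CLAIM (what is proved, stated in full; the proofs are below) =====
def Claim_equal_divisible_by_20 : Prop := ∀ (string : String), Dom_divisible_by_20 string → Spec_divisible_by_20 string (divisible_by_20 string)

-- ===== LEMMAS AND PROOFS =====

-- Loop invariant for A's fold: the final is_0 flag records "some zero seen", and the
-- final is_2_4_6_8_0 flag records "an even digit 2/4/6/8 seen, or enough zeros"
-- (one zero suffices once is_0 is already set, otherwise two are needed).
theorem divisible_by_20_loop (l : List Char) (a b : Bool) :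
    l.foldl (fun (st : Bool × Bool) i =>
      if i == '0' && !st.1 then (true, st.2)
      else if i == '0' || i == '2' || i == '4' || i == '6' || i == '8' then (st.1, true)
      else st) (a, b)
    = (a || decide (1 ≤ l.count '0'),
       b || l.any (fun c => "2468".toList.contains c)
         || decide ((if a then 1 else 2) ≤ l.count '0')) := by
  induction l generalizing a b with
  | nil => cases a <;> cases b <;> simp
  | cons h t ih =>
    simp only [List.foldl_cons, List.count_cons, List.any_cons]
    by_cases h0 : h = '0'
    · subst h0
      cases a <;> cases b
      · show List.foldl _ (true, false) t = _
        rw [ih]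
        simp
      · show List.foldl _ (true, true) t = _
        rw [ih]
        simp
      · show List.foldl _ (true, true) t = _
        rw [ih]
        simp
      · show List.foldl _ (true, true) t = _
        rw [ih]
        simp
    · have hne : (h == '0') = false := by simp [h0]
      rw [if_neg (by simp [hne])]
      by_cases he : h = '2' ∨ h = '4' ∨ h = '6' ∨ h = '8'
      · have : (h == '0' || h == '2' || h == '4' || h == '6' || h == '8') = true := by
          rcases he with h'|h'|h'|h' <;> simp [h']
        rw [if_pos this, ih]
        have hc : ("2468".toList.contains h) = true := by
          rcases he with h'|h'|h'|h' <;> simp [h']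
        simp [hne]
        tauto
      · have : (h == '0' || h == '2' || h == '4' || h == '6' || h == '8') = false := by
          simp [h0]; tauto
        rw [if_neg (by simp [this]), ih]
        have hc : ("2468".toList.contains h) = false := by
          simp; tauto
        obtain ⟨n2, n4, n6, n8⟩ : ¬h = '2' ∧ ¬h = '4' ∧ ¬h = '6' ∧ ¬h = '8' := by tauto
        simp [hne, n2, n4, n6, n8]

-- B's running sum of 1s over zeros is the zero count.
theorem zeros_eq (l : List Char) :
    l.foldl (fun acc c => if c == '0' then acc + 1 else acc) (0 : Int) = (l.count '0' : Int) := by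
  have := PySem.List.foldl_beq_add_one (l := l) (v := '0') (a := (0 : Int))
  simpa using this

-- ===== VERDICT (by name: the statement is the Claim_ definition above) =====
theorem divisible_by_20_spec : Claim_equal_divisible_by_20 := by
  intro s _
  unfold Spec_divisible_by_20 divisible_by_20 divisible_by_20_alt
  rw [divisible_by_20_loop, zeros_eq]
  simp only [Bool.false_or]
  rcases hn : s.toList.count '0' with _|_|n <;>
    cases he : s.toList.any (fun c => "2468".toList.contains c) <;> simp <;> omega
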